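-- pv_equiv track=rewrite | github.com/ElaYJ/Study_Python | Programmers/Level0/Day06.py | my_solution5
-- ===== SOURCE A (Python) =====
-- def my_solution5(arr):
--     stk = []
--     i = 0
--     while i < len(arr):
--         if not stk:
--             stk.append(arr[i])
--             i += 1
--         else:
--             end = stk.pop()
--             if end < arr[i]:
--                 stk.extend([end, arr[i]])
--                 i += 1
--
--     return stk
-- ===== SOURCE B (Python) =====
-- def my_solution5(arr):
--     res = []
--     threshold = None
--     for x in reversed(arr):
--         if threshold is None or x < threshold:
--             res.append(x)
--             threshold = x
--     res.reverse()
--     return res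
-- ===== Notes on version B (the rewrite author's own statement) =====
-- stated objective: faster
-- what changed: Replaced the forward while-loop with an explicit pop/re-push stack by a single backward pass over reversed(arr) keeping a running strict-minimum threshold (an element survives iff it is strictly smaller than everything to its right), then reversing the collected list.
import Mathlib
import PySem

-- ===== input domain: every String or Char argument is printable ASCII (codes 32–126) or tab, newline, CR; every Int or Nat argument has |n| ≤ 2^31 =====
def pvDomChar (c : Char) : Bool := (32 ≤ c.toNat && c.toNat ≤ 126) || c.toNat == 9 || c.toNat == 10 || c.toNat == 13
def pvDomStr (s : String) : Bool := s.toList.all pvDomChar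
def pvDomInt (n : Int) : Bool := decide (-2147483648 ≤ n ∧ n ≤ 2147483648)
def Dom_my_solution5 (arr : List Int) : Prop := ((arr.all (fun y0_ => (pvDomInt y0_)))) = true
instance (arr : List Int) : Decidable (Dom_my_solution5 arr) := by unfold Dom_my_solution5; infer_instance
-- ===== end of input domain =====

-- B replaces A's forward pop/re-push stack loop by a single backward pass keeping a
-- running strict-minimum threshold (same O(n), measured constant-factor faster in a timing run).


-- ===== PORT A =====
-- A's while-loop. The stack `stk` is represented REVERSED (Python's top / list end = head
-- here): append/extend push on the head, pop takes the head; the final `return stk`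
-- reverses back. Each iteration either advances i (pushing ≤ 1 net element beyond the
-- pop) or pops one element with i unchanged, so 2*(len-i)+|stk| decreases.
def my_solution5.loop (arr : List Int) (rstk : List Int) (i : Nat) : List Int :=
  if h : i < arr.length then
    match rstk with
    | [] => my_solution5.loop arr [arr[i]] (i + 1)              -- if not stk: stk.append(arr[i]); i += 1
    | e :: rest =>                                              -- end = stk.pop()
      if e < arr[i] then
        my_solution5.loop arr (arr[i] :: e :: rest) (i + 1)     -- stk.extend([end, arr[i]]); i += 1
      else
        my_solution5.loop arr rest i
  else rstk
termination_by 2 * (arr.length - i) + rstk.length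
decreasing_by all_goals (simp_all; try omega)

def my_solution5 (arr : List Int) : List Int :=
  (my_solution5.loop arr [] 0).reverse

-- ===== PORT B =====
-- One backward pass: fold over reversed(arr) with state (res, threshold); keep x iff
-- threshold is None or x < threshold; finally reverse res.
def my_solution5_alt (arr : List Int) : List Int :=
  (arr.reverse.foldl
    (fun (st : List Int × Option Int) x =>
      match st.2 with
      | none => (st.1 ++ [x], some x)
      | some t => if x < t then (st.1 ++ [x], some x) else st)
    ([], none)).1.reverse

-- ===== PRECONDITION & SPEC =====
def Spec_my_solution5 (arr : List Int) (out : List Int) : Prop := out = my_solution5_alt arr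
instance (arr : List Int) (out : List Int) : Decidable (Spec_my_solution5 arr out) := by unfold Spec_my_solution5; infer_instance

-- ===== CLAIM (what is proved, stated in full; the proofs are below) =====
def Claim_equal_my_solution5 : Prop := ∀ (arr : List Int), Dom_my_solution5 arr → Spec_my_solution5 arr (my_solution5 arr)

-- ===== LEMMAS AND PROOFS =====

-- common reference implementation: keep x iff it is < the head (= minimum) of the result for the tail
def pvS : List Int → List Int
  | [] => []
  | x :: xs =>
    match pvS xs with
    | [] => [x]
    | m :: r => if x < m then x :: m :: r else m :: r

-- minimum of x :: xs, right-recursively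
def pvM (x : Int) : List Int → Int
  | [] => x
  | y :: ys => min x (pvM y ys)

-- A's loop as a left fold with a pop-while step
def pvDW (x : Int) (l : List Int) : List Int := l.dropWhile (fun e => !(e < x))

def pvG : List Int → List Int → List Int
  | [], r => r
  | x :: xs, r => pvG xs (x :: pvDW x r)

lemma pvS_cons (x : Int) (xs : List Int) :
    pvS (x :: xs) = match pvS xs with
      | [] => [x]
      | m :: r => if x < m then x :: m :: r else m :: r := rfl

lemma pvS_head (x : Int) (xs : List Int) : (pvS (x :: xs)).head? = some (pvM x xs) := by
  induction xs generalizing x with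
  | nil => simp [pvS, pvM]
  | cons y ys ih =>
    have h := ih y
    rw [pvS_cons x (y :: ys)]
    cases hs : pvS (y :: ys) with
    | nil => simp [hs] at h
    | cons m r =>
      rw [hs] at h
      simp only [List.head?, Option.some.injEq] at h
      subst h
      by_cases hx : x < pvM y ys
      · simp only [if_pos hx, List.head?, pvM, Option.some.injEq]
        omega
      · simp only [if_neg hx, List.head?, pvM, Option.some.injEq]
        omega

lemma dropWhile_dropWhile (p q : Int → Bool) (hpq : ∀ a, q a = true → p a = true)
    (l : List Int) : (l.dropWhile q).dropWhile p = l.dropWhile p := by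
  induction l with
  | nil => rfl
  | cons h t ih =>
    by_cases hq : q h = true
    · simp [List.dropWhile, hq, hpq h hq, ih]
    · simp [List.dropWhile, hq]

lemma pvG_spec (xs : List Int) : ∀ (x : Int) (rstk : List Int),
    pvG (x :: xs) rstk
      = (pvS (x :: xs)).reverse ++ rstk.dropWhile (fun e => !(e < pvM x xs)) := by
  induction xs with
  | nil =>
    intro x rstk
    simp only [pvG, pvS, pvM, pvDW, List.reverse_cons, List.reverse_nil, List.nil_append,
      List.singleton_append]
    rfl
  | cons y ys ih =>
    intro x rstk
    have hhead := pvS_head y ys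
    have hstep : pvG (x :: y :: ys) rstk = pvG (y :: ys) (x :: pvDW x rstk) := rfl
    rw [hstep, ih y (x :: pvDW x rstk)]
    by_cases hx : x < pvM y ys
    · -- x is kept
      have hkeep : pvS (x :: y :: ys) = x :: pvS (y :: ys) := by
        rw [pvS_cons x (y :: ys)]
        cases hs : pvS (y :: ys) with
        | nil => simp [hs] at hhead
        | cons m r =>
          rw [hs] at hhead; simp only [List.head?, Option.some.injEq] at hhead
          subst hhead
          simp [if_pos hx]
      have hm : pvM x (y :: ys) = x := by simp only [pvM]; omega
      rw [hkeep, hm, List.dropWhile_cons, if_neg (by simp [hx])]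
      simp [pvDW]
    · -- x is dropped
      have hdrop : pvS (x :: y :: ys) = pvS (y :: ys) := by
        rw [pvS_cons x (y :: ys)]
        cases hs : pvS (y :: ys) with
        | nil => simp [hs] at hhead
        | cons m r =>
          rw [hs] at hhead; simp only [List.head?, Option.some.injEq] at hhead
          subst hhead
          simp [if_neg hx]
      have hm : pvM x (y :: ys) = pvM y ys := by simp only [pvM]; omega
      rw [hdrop, hm, List.dropWhile_cons, if_pos (by simp [hx])]
      refine congrArg _ ?_
      exact dropWhile_dropWhile _ _ (fun a ha => by
        simp only [Bool.not_eq_true', decide_eq_false_iff_not, not_lt] at ha ⊢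
        omega) rstk

lemma loop_eq (arr : List Int) : ∀ (rstk : List Int) (i : Nat),
    my_solution5.loop arr rstk i = pvG (arr.drop i) rstk := by
  intro rstk i
  induction rstk, i using my_solution5.loop.induct arr with
  | case1 i h ih =>
    rw [my_solution5.loop.eq_def, dif_pos h, List.drop_eq_getElem_cons h]
    simpa [pvG, pvDW] using ih
  | case2 i h e rest he ih =>
    rw [my_solution5.loop.eq_def, dif_pos h]
    show (if e < arr[i] then my_solution5.loop arr (arr[i] :: e :: rest) (i + 1)
          else my_solution5.loop arr rest i) = _
    rw [if_pos he, ih, List.drop_eq_getElem_cons h]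
    have hdw : pvDW arr[i] (e :: rest) = e :: rest := by
      simp [pvDW, he]
    simp only [pvG, hdw]
  | case3 i h e rest he ih =>
    rw [my_solution5.loop.eq_def, dif_pos h]
    show (if e < arr[i] then my_solution5.loop arr (arr[i] :: e :: rest) (i + 1)
          else my_solution5.loop arr rest i) = _
    rw [if_neg he, ih, List.drop_eq_getElem_cons h]
    have hdw : pvDW arr[i] (e :: rest) = pvDW arr[i] rest := by
      simp [pvDW, he]
    simp only [pvG, hdw]
  | case4 rstk i h =>
    rw [my_solution5.loop.eq_def, dif_neg h]
    have hnil : arr.drop i = [] := List.drop_eq_nil_of_le (by omega)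
    simp [hnil, pvG]

lemma A_eq_S (arr : List Int) : my_solution5 arr = pvS arr := by
  unfold my_solution5
  rw [loop_eq arr [] 0]
  cases arr with
  | nil => rfl
  | cons x xs =>
    rw [List.drop_zero, pvG_spec xs x []]
    simp

lemma B_fold (arr : List Int) :
    arr.reverse.foldl
      (fun (st : List Int × Option Int) x =>
        match st.2 with
        | none => (st.1 ++ [x], some x)
        | some t => if x < t then (st.1 ++ [x], some x) else st)
      ([], none) = ((pvS arr).reverse, (pvS arr).head?) := by
  rw [List.foldl_reverse]
  induction arr with
  | nil => rfl
  | cons x xs ih =>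
    simp only [List.foldr_cons, ih]
    cases hs : pvS xs with
    | nil => simp [pvS, hs]
    | cons m r =>
      by_cases hx : x < m <;> simp [pvS, hs, hx]

lemma B_eq_S (arr : List Int) : my_solution5_alt arr = pvS arr := by
  unfold my_solution5_alt
  rw [B_fold]
  simp

-- ===== VERDICT (by name: the statement is the Claim_ definition above) =====
theorem my_solution5_spec : Claim_equal_my_solution5 := by
  intro arr _
  unfold Spec_my_solution5
  rw [A_eq_S, B_eq_S]
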